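-- pv_equiv track=rewrite | github.com/dagnyr/hyperloop | archive/cdr.py | parse_header_fields
-- ===== SOURCE A (Python) =====
-- def parse_header_fields(header: str):
--     """
--     Extract pdb_id, chain_id, uniprot_acc from headers like:
--       1ABC|TCR_chain=A|uniprot=P12345
--     """
--     parts = header.split("|")
--     pdb_id = parts[0] if parts else header
--     chain_id = None
--     uniprot_acc = None
--
--     for p in parts[1:]:
--         if p.startswith("TCR_chain="):
--             chain_id = p.split("=", 1)[1]
--         elif p.startswith("uniprot="):
--             uniprot_acc = p.split("=", 1)[1]
--
--     return pdb_id, chain_id, uniprot_acc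
-- ===== SOURCE B (Python) =====
-- def parse_header_fields(header: str):
--     """
--     Extract pdb_id, chain_id, uniprot_acc from headers like:
--       1ABC|TCR_chain=A|uniprot=P12345
--     Per-key backward scan: for each key, walk parts[1:] in reverse and return
--     the value of the first (i.e. last-occurring) part with that key's prefix,
--     taken by slicing off the prefix. Two staged scans replace A's single
--     forward pass with two accumulators; backward-first-match = forward-last-wins.
--     """
--     parts = header.split("|")
--
--     def last_value(prefix):
--         for p in reversed(parts[1:]):
--             if p.startswith(prefix):
--                 return p[len(prefix):]
--         return None
--
--     return parts[0], last_value("TCR_chain="), last_value("uniprot=")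
-- ===== Notes on version B (the rewrite author's own statement) =====
-- stated objective: alternative
-- what changed: B replaces A's single forward pass that maintains two accumulators (last assignment wins) by two independent backward scans over the tail parts, each returning at the first match for its key prefix and taking the value by slicing off the prefix length instead of splitting on the first separator; backward first-match equals forward last-wins.
import Mathlib
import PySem

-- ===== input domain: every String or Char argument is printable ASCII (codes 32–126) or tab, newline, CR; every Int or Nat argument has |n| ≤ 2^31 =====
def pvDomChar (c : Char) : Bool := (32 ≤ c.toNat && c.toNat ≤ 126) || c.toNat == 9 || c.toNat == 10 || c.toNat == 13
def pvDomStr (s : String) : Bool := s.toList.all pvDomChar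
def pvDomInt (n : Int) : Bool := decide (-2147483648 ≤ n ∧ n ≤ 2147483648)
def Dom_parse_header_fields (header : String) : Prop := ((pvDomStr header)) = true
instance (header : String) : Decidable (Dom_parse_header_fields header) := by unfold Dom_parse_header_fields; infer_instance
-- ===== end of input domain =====

-- B replaces A's single forward pass with two accumulators by two per-key backward
-- scans returning at the first match (= last-wins), slicing the value off by prefix
-- length (objective: alternative; same cost).

-- ===== PORT A =====
-- p.split("=", 1)[1]  (only evaluated on parts that start with "<key>=")
def pvValA (p : String) : String :=
  ((PySem.Str.splitMax? p "=" 1).getD []).getD 1 ""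

-- the body of A's for-loop, on the state (chain_id, uniprot_acc)
def pvStepA (st : Option String × Option String) (p : String) : Option String × Option String :=
  if PySem.Str.startswith p "TCR_chain=" then (some (pvValA p), st.2)
  else if PySem.Str.startswith p "uniprot=" then (st.1, some (pvValA p))
  else st

def parse_header_fields (header : String) : String × Option String × Option String :=
  let parts := (PySem.Str.split? header "|").getD []
  let pdb_id := if parts.isEmpty then header else parts.headD ""
  let st := (PySem.List.slice parts (some 1) none).foldl pvStepA (none, none)
  (pdb_id, st.1, st.2)

-- ===== PORT B =====
-- B's inner loop: 'for p in rev: if p.startswith(prefix): return p[len(prefix):]' / 'return None'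
def pvLastValue (rev : List String) (pre : String) : Option String :=
  match rev with
  | [] => none
  | p :: rest =>
      if PySem.Str.startswith p pre then
        some (PySem.Str.slice p (some (PySem.Str.len pre)) none)
      else pvLastValue rest pre

def parse_header_fields_alt (header : String) : String × Option String × Option String :=
  let parts := (PySem.Str.split? header "|").getD []
  let rev := (PySem.List.slice parts (some 1) none).reverse
  (parts.headD "", pvLastValue rev "TCR_chain=", pvLastValue rev "uniprot=")

-- ===== PRECONDITION & SPEC =====
def Spec_parse_header_fields (header : String) (out : String × Option String × Option String) : Prop := out = parse_header_fields_alt header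
instance (header : String) (out : String × Option String × Option String) : Decidable (Spec_parse_header_fields header out) := by unfold Spec_parse_header_fields; infer_instance

-- ===== CLAIM =====
def Claim_equal_parse_header_fields : Prop := ∀ (header : String), Dom_parse_header_fields header → Spec_parse_header_fields header (parse_header_fields header)

-- ===== LEMMAS AND PROOFS =====

theorem pv_go_zero (sep : List Char) (fuel : Nat) (l cur : List Char) (acc : List (List Char)) :
    PySem.Chars.splitOnMax.go sep fuel 0 l cur acc = ((cur.reverse ++ l) :: acc).reverse := by
  cases fuel with
  | zero => simp [PySem.Chars.splitOnMax.go]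
  | succ n => cases l with
    | nil => simp [PySem.Chars.splitOnMax.go]
    | cons c rest => simp [PySem.Chars.splitOnMax.go]

theorem pv_go_one (e : Char) (fuel : Nat) (l cur : List Char) (acc : List (List Char))
    (h : l.length < fuel) :
    PySem.Chars.splitOnMax.go [e] fuel 1 l cur acc =
      if e ∈ l then acc.reverse ++ [cur.reverse ++ l.takeWhile (· ≠ e), (l.dropWhile (· ≠ e)).tail]
      else acc.reverse ++ [cur.reverse ++ l] := by
  induction l generalizing fuel cur acc with
  | nil =>
      cases fuel with
      | zero => omega
      | succ n => simp [PySem.Chars.splitOnMax.go]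
  | cons c rest ih =>
      cases fuel with
      | zero => omega
      | succ n =>
        by_cases hc : c = e
        · subst hc
          rw [show PySem.Chars.splitOnMax.go [c] (n+1) 1 (c :: rest) cur acc
              = PySem.Chars.splitOnMax.go [c] n 0 (List.drop 1 (c :: rest)) [] (cur.reverse :: acc) by
            simp [PySem.Chars.splitOnMax.go]]
          rw [pv_go_zero]
          simp
        · rw [show PySem.Chars.splitOnMax.go [e] (n+1) 1 (c :: rest) cur acc
              = PySem.Chars.splitOnMax.go [e] n 1 rest (c :: cur) acc by
            simp [PySem.Chars.splitOnMax.go, List.isPrefixOf]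
            intro h'; exact absurd h'.symm hc]
          rw [ih n (c :: cur) acc (by simpa using Nat.lt_of_succ_lt_succ h)]
          simp [hc, Ne.symm hc]

theorem pv_splitOnMax_one (e : Char) (cs : List Char) :
    PySem.Chars.splitOnMax cs [e] 1 =
      if e ∈ cs then [cs.takeWhile (· ≠ e), (cs.dropWhile (· ≠ e)).tail]
      else [cs] := by
  rw [show PySem.Chars.splitOnMax cs [e] 1
      = PySem.Chars.splitOnMax.go [e] (cs.length + 1) 1 cs [] [] by
    simp [PySem.Chars.splitOnMax]]
  rw [pv_go_one e (cs.length + 1) cs [] [] (by omega)]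
  by_cases hm : e ∈ cs <;> simp [hm]

theorem pv_splitOn_go_shape (sep : List Char) (fuel : Nat) (l cur : List Char)
    (acc : List (List Char)) :
    ∃ h t, PySem.Chars.splitOn.go sep fuel l cur acc = acc.reverse ++ h :: t := by
  induction fuel generalizing l cur acc with
  | zero => exact ⟨cur.reverse ++ l, [], by simp [PySem.Chars.splitOn.go]⟩
  | succ n ih =>
      cases l with
      | nil => exact ⟨cur.reverse, [], by simp [PySem.Chars.splitOn.go]⟩
      | cons c rest =>
          by_cases hp : sep.isPrefixOf (c :: rest) = true
          · obtain ⟨h, t, heq⟩ := ih (List.drop sep.length (c :: rest)) [] (cur.reverse :: acc)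
            exact ⟨cur.reverse, h :: t, by simp [PySem.Chars.splitOn.go, hp, heq]⟩
          · obtain ⟨h, t, heq⟩ := ih rest (c :: cur) acc
            exact ⟨h, t, by simp [PySem.Chars.splitOn.go, hp, heq]⟩

theorem pv_splitOn_ne_nil (cs sep : List Char) : PySem.Chars.splitOn cs sep ≠ [] := by
  unfold PySem.Chars.splitOn
  obtain ⟨h, t, heq⟩ := pv_splitOn_go_shape sep (cs.length + 1) cs [] []
  simp [heq]

theorem pv_take_drop_eq (k : List Char) (e : Char) (he : e ∉ k) (t : List Char) :
    (k ++ e :: t).takeWhile (· ≠ e) = k ∧ (k ++ e :: t).dropWhile (· ≠ e) = e :: t := by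
  induction k with
  | nil => simp
  | cons c ks ih =>
      simp only [List.mem_cons, not_or] at he
      obtain ⟨h1, h2⟩ := he
      obtain ⟨t1, t2⟩ := ih h2
      have hc : decide (c ≠ e) = true := by simp; exact fun h => h1 h.symm
      rw [List.cons_append, List.takeWhile_cons, List.dropWhile_cons, if_pos hc, if_pos hc]
      exact ⟨by rw [t1], by rw [t2]⟩

-- when p starts with "<key>=" ('=' not in key), A's split("=",1)[1] equals B's p[len(prefix):]
theorem pv_val_eq (k pre p : String) (hfull : pre.toList = k.toList ++ ['='])
    (hk : '=' ∉ k.toList) (hsw : PySem.Str.startswith p pre = true) :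
    pvValA p = PySem.Str.slice p (some (PySem.Str.len pre)) none := by
  have hpre : pre.toList <+: p.toList := by
    rw [PySem.Str.startswith_eq] at hsw
    exact (PySem.Chars.startswith_iff _ _).mp hsw
  obtain ⟨t, ht⟩ := hpre
  have hp : p.toList = k.toList ++ '=' :: t := by rw [← ht, hfull]; simp
  have hmem : '=' ∈ p.toList := by rw [hp]; simp
  obtain ⟨t1, t2⟩ := pv_take_drop_eq k.toList '=' hk t
  have hsm : PySem.Chars.splitOnMax p.toList ['='] 1 = [k.toList, t] := by
    rw [pv_splitOnMax_one, if_pos hmem, hp, t1, t2]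
    simp
  have hsm2 : PySem.Str.splitMax? p "=" 1 = some [String.ofList k.toList, String.ofList t] := by
    simp only [PySem.Str.splitMax?, PySem.Chars.splitMax?]
    rw [show ("=" : String).toList = ['='] from rfl]
    simp [hsm]
  have hL : (pvValA p).toList = t := by
    simp [pvValA, hsm2]
  have hR : (PySem.Str.slice p (some (PySem.Str.len pre)) none).toList = t := by
    rw [PySem.Str.toList_slice, PySem.Chars.slice_eq_listSlice]
    have hlen : PySem.Str.len pre = ((k.toList.length + 1 : Nat) : Int) := by
      simp [PySem.Str.len, hfull]
    have hp2 : p.toList = (k.toList ++ ['=']) ++ t := by rw [hp]; simp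
    rw [hlen, PySem.List.slice_from_natCast, hp2,
      show k.toList.length + 1 = (k.toList ++ ['=']).length by simp, List.drop_left]
  exact String.toList_injective (hL.trans hR.symm)

theorem pv_not_both (p : String) (h1 : PySem.Str.startswith p "TCR_chain=" = true)
    (h2 : PySem.Str.startswith p "uniprot=" = true) : False := by
  simp only [PySem.Str.startswith_eq, PySem.Chars.startswith, List.isPrefixOf_iff_prefix] at h1 h2
  obtain ⟨t1, ht1⟩ := h1
  obtain ⟨t2, ht2⟩ := h2
  have e1 : p.toList.head? = some 'T' := by rw [← ht1]; rfl
  have e2 : p.toList.head? = some 'u' := by rw [← ht2]; rfl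
  rw [e1] at e2
  simp at e2

theorem pvLastValue_append (a b : List String) (pre : String) :
    pvLastValue (a ++ b) pre = (pvLastValue a pre).or (pvLastValue b pre) := by
  induction a with
  | nil => simp [pvLastValue]
  | cons p rest ih =>
      simp only [List.cons_append, pvLastValue]
      by_cases h : PySem.Str.startswith p pre = true
      · rw [if_pos h, if_pos h]; simp
      · rw [if_neg h, if_neg h]; exact ih

theorem pv_step1 (st : Option String × Option String) (p : String) :
    (pvStepA st p).1 = (pvLastValue [p] "TCR_chain=").or st.1 := by
  unfold pvStepA pvLastValue
  by_cases h1 : PySem.Str.startswith p "TCR_chain=" = true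
  · rw [pv_val_eq "TCR_chain" "TCR_chain=" p rfl (by decide) h1, if_pos h1, if_pos h1]
    simp
  · rw [if_neg h1, if_neg h1]
    by_cases h2 : PySem.Str.startswith p "uniprot=" = true
    · rw [if_pos h2]; simp [pvLastValue]
    · rw [if_neg h2]; simp [pvLastValue]

theorem pv_step2 (st : Option String × Option String) (p : String) :
    (pvStepA st p).2 = (pvLastValue [p] "uniprot=").or st.2 := by
  unfold pvStepA pvLastValue
  by_cases h2 : PySem.Str.startswith p "uniprot=" = true
  · have h1 : ¬ PySem.Str.startswith p "TCR_chain=" = true := fun h1 => pv_not_both p h1 h2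
    rw [if_neg h1, pv_val_eq "uniprot" "uniprot=" p rfl (by decide) h2, if_pos h2, if_pos h2]
    simp
  · rw [if_neg h2, if_neg h2]
    split_ifs <;> simp [pvLastValue]

theorem pv_fold1 (l : List String) (st : Option String × Option String) :
    (l.foldl pvStepA st).1 = (pvLastValue l.reverse "TCR_chain=").or st.1 := by
  induction l generalizing st with
  | nil => simp [pvLastValue]
  | cons p rest ih =>
      simp only [List.foldl_cons, List.reverse_cons]
      rw [ih, pvLastValue_append, Option.or_assoc, ← pv_step1]

theorem pv_fold2 (l : List String) (st : Option String × Option String) :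
    (l.foldl pvStepA st).2 = (pvLastValue l.reverse "uniprot=").or st.2 := by
  induction l generalizing st with
  | nil => simp [pvLastValue]
  | cons p rest ih =>
      simp only [List.foldl_cons, List.reverse_cons]
      rw [ih, pvLastValue_append, Option.or_assoc, ← pv_step2]

theorem pv_main (header : String) :
    parse_header_fields header = parse_header_fields_alt header := by
  unfold parse_header_fields parse_header_fields_alt
  have hsplit : (PySem.Str.split? header "|").getD [] =
      (PySem.Chars.splitOn header.toList ['|']).map String.ofList := by
    simp [PySem.Str.split?, PySem.Chars.split?]
  rw [hsplit]
  obtain ⟨h0, t0, hgo⟩ : ∃ h t, PySem.Chars.splitOn header.toList ['|'] = h :: t := by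
    rcases hcase : PySem.Chars.splitOn header.toList ['|'] with _ | ⟨h, t⟩
    · exact absurd hcase (pv_splitOn_ne_nil _ _)
    · exact ⟨h, t, rfl⟩
  rw [hgo]
  simp only [List.map_cons, List.isEmpty_cons, List.headD_cons]
  rw [pv_fold1, pv_fold2]
  simp

-- ===== VERDICT =====
theorem parse_header_fields_spec : Claim_equal_parse_header_fields := by
  intro header _
  unfold Spec_parse_header_fields
  exact pv_main header
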